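-- pv_equiv track=rewrite | github.com/MatousMarik/AI | search/problems.py | get_dists
-- ===== SOURCE A (Python) =====
-- from typing import List, Union
--
-- def get_dists(size: int) -> List[List[int]]:
--     dists = []
--     for i in range(size**2):
--         di = []
--         for j in range(size**2):
--             # taxicab distance
--             di.append(abs(i // size - j // size) + abs(i % size - j % size))
--         dists.append(di)
--     return dists
-- ===== SOURCE B (Python) =====
-- def get_dists(size):
--     n = size ** 2
--     coords = [divmod(i, size) for i in range(n)]
--     dists = []
--     for i in range(n):
--         q, r = coords[i]
--         # distance is symmetric: mirror the lower triangle from rows already built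
--         row = [dists[j][i] for j in range(i)]
--         row.append(0)  # diagonal
--         for j in range(i + 1, n):
--             qj, rj = coords[j]
--             row.append(abs(q - qj) + abs(r - rj))
--         dists.append(row)
--     return dists
-- ===== Notes on version B (the rewrite author's own statement) =====
-- stated objective: alternative
-- what changed: B precomputes each cell's divmod coordinate pair in one pass and then builds each matrix row as mirrored-prefix + zero-diagonal + computed-suffix, reading the lower triangle out of the already-built rows via the symmetry of the distance instead of recomputing every entry.
import Mathlib
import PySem

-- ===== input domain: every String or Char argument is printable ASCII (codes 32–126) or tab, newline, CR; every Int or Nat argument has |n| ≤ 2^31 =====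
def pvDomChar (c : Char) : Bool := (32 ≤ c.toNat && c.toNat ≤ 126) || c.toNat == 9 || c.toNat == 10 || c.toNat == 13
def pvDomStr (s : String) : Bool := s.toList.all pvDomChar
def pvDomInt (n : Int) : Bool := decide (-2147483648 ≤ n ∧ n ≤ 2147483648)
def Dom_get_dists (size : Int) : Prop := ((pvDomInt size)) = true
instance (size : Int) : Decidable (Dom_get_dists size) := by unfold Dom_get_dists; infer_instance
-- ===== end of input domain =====

-- B precomputes the divmod coordinates once, computes only the upper-triangle entries and mirrors the lower triangle from already-built rows (symmetry of the distance); an alternative construction of the same matrix.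


-- ===== PORT A =====
-- abs(x) on int is ported as the cast of Int.natAbs (exact: |x|)
def get_dists (size : Int) : List (List Int) :=
  (PySem.List.pyRange 0 (size ^ 2) 1).foldl (fun dists i =>
    dists ++ [(PySem.List.pyRange 0 (size ^ 2) 1).foldl (fun di j =>
      di ++ [((PySem.Int.floordiv i size - PySem.Int.floordiv j size).natAbs : Int) +
             ((PySem.Int.mod i size - PySem.Int.mod j size).natAbs : Int)]) []]) []

-- ===== PORT B =====
-- coords = [divmod(i, size) ...]; each row is the mirrored prefix read from earlier
-- rows (dists[j][i]), the 0 diagonal, then the computed upper-triangle suffix.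
def get_dists_alt(size : Int) : List (List Int) :=
  let n := size ^ 2
  let coords := (PySem.List.pyRange 0 n 1).map (fun i => (PySem.Int.floordiv i size, PySem.Int.mod i size))
  (PySem.List.pyRange 0 n 1).foldl (fun dists i =>
    let qr := PySem.List.pyGetD coords i (0, 0)
    let row := (PySem.List.pyRange 0 i 1).map (fun j => PySem.List.pyGetD (PySem.List.pyGetD dists j []) i 0)
    let row := row ++ [0]
    let row := (PySem.List.pyRange (i + 1) n 1).foldl (fun row j =>
      let qrj := PySem.List.pyGetD coords j (0, 0)
      row ++ [((qr.1 - qrj.1).natAbs : Int) + ((qr.2 - qrj.2).natAbs : Int)]) row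
    dists ++ [row]) []

-- ===== PRECONDITION & SPEC =====
def Spec_get_dists (size : Int) (out : List (List Int)) : Prop := out = get_dists_alt size
instance (size : Int) (out : List (List Int)) : Decidable (Spec_get_dists size out) := by unfold Spec_get_dists; infer_instance

-- ===== CLAIM (what is proved, stated in full; the proofs are below) =====
def Claim_equal_get_dists : Prop := ∀ (size : Int), Dom_get_dists size → Spec_get_dists size (get_dists size)

-- ===== LEMMAS AND PROOFS =====
-- pvM is the taxicab entry, pvRow a target row, pvBody B's loop body (pv_alt_eq: by rfl).
def pvM (size i j : Int) : Int :=
  ((PySem.Int.floordiv i size - PySem.Int.floordiv j size).natAbs : Int) +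
  ((PySem.Int.mod i size - PySem.Int.mod j size).natAbs : Int)

def pvRow (size i : Int) : List Int := (PySem.List.pyRange 0 (size ^ 2) 1).map (pvM size i)

def pvBody (size : Int) (dists : List (List Int)) (i : Int) : List (List Int) :=
  let coords := (PySem.List.pyRange 0 (size ^ 2) 1).map (fun i => (PySem.Int.floordiv i size, PySem.Int.mod i size))
  let qr := PySem.List.pyGetD coords i (0, 0)
  let row := (PySem.List.pyRange 0 i 1).map (fun j => PySem.List.pyGetD (PySem.List.pyGetD dists j []) i 0)
  let row := row ++ [0]
  let row := (PySem.List.pyRange (i + 1) (size ^ 2) 1).foldl (fun row j =>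
    let qrj := PySem.List.pyGetD coords j (0, 0)
    row ++ [((qr.1 - qrj.1).natAbs : Int) + ((qr.2 - qrj.2).natAbs : Int)]) row
  dists ++ [row]

theorem pv_alt_eq (size : Int) :
    get_dists_alt size = (PySem.List.pyRange 0 (size ^ 2) 1).foldl (pvBody size) [] := rfl

theorem pvM_sym (s i j : Int) : pvM s i j = pvM s j i := by
  unfold pvM
  rw [← Int.natAbs_neg (PySem.Int.floordiv i s - PySem.Int.floordiv j s),
      ← Int.natAbs_neg (PySem.Int.mod i s - PySem.Int.mod j s)]
  ring_nf

theorem pvM_diag (s i : Int) : pvM s i i = 0 := by simp [pvM]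

theorem pv_A_eq (size : Int) :
    get_dists size = (PySem.List.pyRange 0 (size ^ 2) 1).map (pvRow size) := by
  unfold get_dists pvRow pvM
  rw [PySem.List.foldl_append_singleton_eq_map]
  simp only [PySem.List.foldl_append_singleton_eq_map, List.nil_append]

theorem pv_step (size k : Int) (hk : 0 ≤ k) (hklt : k < size ^ 2) :
    pvBody size ((PySem.List.pyRange 0 k 1).map (pvRow size)) k =
    (PySem.List.pyRange 0 (k + 1) 1).map (pvRow size) := by
  simp only [pvBody]
  have hcoord : ∀ j : Int, 0 ≤ j → j < size ^ 2 →
      PySem.List.pyGetD ((PySem.List.pyRange 0 (size ^ 2) 1).map (fun i => (PySem.Int.floordiv i size, PySem.Int.mod i size))) j (0, 0) =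
      (PySem.Int.floordiv j size, PySem.Int.mod j size) := fun j h1 h2 =>
    PySem.List.pyGetD_map_pyRange_of_nonneg _ _ _ _ h1 h2
  rw [PySem.List.pyRange_one_succ_right hk, List.map_append]
  congr 1
  rw [PySem.List.foldl_append_singleton_eq_map]
  have hmir : (PySem.List.pyRange 0 k 1).map (fun j =>
      PySem.List.pyGetD (PySem.List.pyGetD ((PySem.List.pyRange 0 k 1).map (pvRow size)) j []) k 0) =
      (PySem.List.pyRange 0 k 1).map (pvM size k) := by
    apply List.map_congr_left
    intro j hj
    obtain ⟨hj0, hjk⟩ := (PySem.List.mem_pyRange_one).mp hj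
    rw [PySem.List.pyGetD_map_pyRange_of_nonneg _ _ _ _ hj0 hjk]
    unfold pvRow
    rw [PySem.List.pyGetD_map_pyRange_of_nonneg _ _ _ _ hk hklt]
    exact (pvM_sym size k j).symm
  have htail : (PySem.List.pyRange (k + 1) (size ^ 2) 1).map (fun j =>
      (((PySem.List.pyGetD ((PySem.List.pyRange 0 (size ^ 2) 1).map (fun i => (PySem.Int.floordiv i size, PySem.Int.mod i size))) k (0, 0)).1 -
        (PySem.List.pyGetD ((PySem.List.pyRange 0 (size ^ 2) 1).map (fun i => (PySem.Int.floordiv i size, PySem.Int.mod i size))) j (0, 0)).1).natAbs : Int) +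
      (((PySem.List.pyGetD ((PySem.List.pyRange 0 (size ^ 2) 1).map (fun i => (PySem.Int.floordiv i size, PySem.Int.mod i size))) k (0, 0)).2 -
        (PySem.List.pyGetD ((PySem.List.pyRange 0 (size ^ 2) 1).map (fun i => (PySem.Int.floordiv i size, PySem.Int.mod i size))) j (0, 0)).2).natAbs : Int)) =
      (PySem.List.pyRange (k + 1) (size ^ 2) 1).map (pvM size k) := by
    apply List.map_congr_left
    intro j hj
    obtain ⟨hj1, hj2⟩ := (PySem.List.mem_pyRange_one).mp hj
    rw [hcoord k hk hklt, hcoord j (by omega) hj2]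
    rfl
  rw [hmir, htail, List.map_singleton]
  congr 1
  unfold pvRow
  rw [PySem.List.pyRange_one_append 0 k (size ^ 2) hk (by omega),
      PySem.List.pyRange_one_append k (k + 1) (size ^ 2) (by omega) (by omega),
      PySem.List.pyRange_one_singleton]
  simp only [List.map_append, List.map_cons, List.map_nil, List.append_assoc, pvM_diag]

theorem pv_B_inv (size : Int) (m : Nat) : ∀ (k : Int), 0 ≤ k → k + m = size ^ 2 →
    (PySem.List.pyRange k (size ^ 2) 1).foldl (pvBody size) ((PySem.List.pyRange 0 k 1).map (pvRow size)) =
    (PySem.List.pyRange 0 (size ^ 2) 1).map (pvRow size) := by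
  induction m with
  | zero =>
    intro k hk hkn
    have h2 : size ^ 2 ≤ k := by omega
    rw [PySem.List.pyRange_one_eq_nil h2]
    simp only [List.foldl_nil]
    have h3 : k = size ^ 2 := by omega
    rw [h3]
  | succ m ih =>
    intro k hk hkn
    have hklt : k < size ^ 2 := by omega
    rw [PySem.List.pyRange_one_cons hklt, List.foldl_cons, pv_step size k hk hklt]
    exact ih (k + 1) (by omega) (by omega)

theorem pv_B_eq (size : Int) :
    get_dists_alt size = (PySem.List.pyRange 0 (size ^ 2) 1).map (pvRow size) := by
  rw [pv_alt_eq]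
  have h := pv_B_inv size (size ^ 2).toNat 0 (le_refl 0) (by
    have : (0:Int) ≤ size ^ 2 := sq_nonneg size
    omega)
  simpa using h

-- ===== VERDICT (by name: the statement is the Claim_ definition above) =====
theorem get_dists_spec : Claim_equal_get_dists := by
  intro size _
  unfold Spec_get_dists
  rw [pv_A_eq, pv_B_eq]
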